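-- pv_equiv track=rewrite | github.com/dmsavvin/hrank | hrank/queens_on_board/queens_on_board.py | get_under_threat_for_cells
-- ===== SOURCE A (Python) =====
-- def get_under_threat_for_cells(board: list) -> dict:
--     '''For each free cell in the board generates collection of the cells that
--     are under threat if a queen will be placed in the given cell.
--
--     Returns:
--       The dict where keys are the cells without obstacles and the values are
--       the frozensets of cells which are under threat if a queen will be placed
--       in the position corresponding to key.
--     '''
--     under_threat_for_cells = dict()
--     R = len(board)
--     C = len(board[0])
--     for i, j in ((i, j) for i in range(R)
--                  for j in range(C) if board[i][j] != '#'):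
--         ut = set()
--         directions = [[i, j, 1, 0],
--                       [i, j, 1, 1],
--                       [i, j, 0, 1],
--                       [i, j, -1, 1],
--                       [i, j, -1, 0],
--                       [i, j, -1, -1],
--                       [i, j, 0, -1],
--                       [i, j, 1, -1]
--                       ]
--         ut.add((i, j))
--         while directions:
--             for d in directions:
--                 d[0] += d[2]
--                 d[1] += d[3]
--                 if 0 <= d[0] < R and 0 <= d[1] < C \
--                    and board[d[0]][d[1]] != '#':
--                     ut.add((d[0], d[1]))
--                 else:
--                     d[0] = -1
--             directions = [d for d in directions if d[0] != -1]
--         under_threat_for_cells[(i, j)] = frozenset(ut)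
--     return under_threat_for_cells
-- ===== SOURCE B (Python) =====
-- def get_under_threat_for_cells(board: list) -> dict:
--     R = len(board)
--     C = len(board[0])
--     res = {}
--     for i in range(R):
--         for j in range(C):
--             if board[i][j] == '#':
--                 continue
--             ut = {(i, j)}
--             for dr, dc in ((1, 0), (1, 1), (0, 1), (-1, 1),
--                            (-1, 0), (-1, -1), (0, -1), (1, -1)):
--                 r, c = i + dr, j + dc
--                 while 0 <= r < R and 0 <= c < C and board[r][c] != '#':
--                     ut.add((r, c))
--                     r += dr
--                     c += dc
--             res[(i, j)] = frozenset(ut)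
--     return res
-- ===== Notes on version B (the rewrite author's own statement) =====
-- stated objective: simpler
-- what changed: Replaces A's lockstep round-robin advancement of eight mutable 4-element direction records with -1 sentinel marking and per-pass list pruning by independent per-direction rays: for each free cell, each of the 8 directions gets its own plain while-loop stepping outward until the border or a '#'; the frozenset makes the traversal order irrelevant.
import Mathlib
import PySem

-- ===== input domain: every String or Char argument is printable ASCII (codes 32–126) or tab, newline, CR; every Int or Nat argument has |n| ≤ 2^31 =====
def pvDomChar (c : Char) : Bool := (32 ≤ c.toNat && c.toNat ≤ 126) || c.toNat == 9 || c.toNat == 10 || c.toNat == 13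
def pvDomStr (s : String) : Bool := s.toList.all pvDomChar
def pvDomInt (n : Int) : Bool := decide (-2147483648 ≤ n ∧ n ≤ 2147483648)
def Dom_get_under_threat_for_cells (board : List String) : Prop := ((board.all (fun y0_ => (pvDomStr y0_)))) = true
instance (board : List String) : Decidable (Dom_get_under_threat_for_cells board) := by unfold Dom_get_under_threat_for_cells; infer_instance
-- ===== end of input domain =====

-- B replaces A's lockstep round-robin advancement of eight mutable direction records (with the -1
-- sentinel and per-pass pruning) by independent per-direction rays, each a plain while-loop — simpler.
-- frozenset has no order: both ports store it canonically as the lex-sorted list of distinct cells.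

-- ===== PORT A =====
-- board[r][c] : exact whenever 0 ≤ r < len board and 0 ≤ c < len (board[r]) — the only place A reads it
-- (the preceding bounds test guards every read; a row shorter than board[0] is outside Pre_).
def pvCellA (board : List String) (r c : Int) : Char :=
  ((PySem.List.pyGetD board r "").toList).getD c.toNat ' '

-- frozenset(ut) : canonical list form of the finite set — distinct elements, lex-sorted
def pvFrozen (l : List (Int × Int)) : List (Int × Int) :=
  PySem.List.sorted (PySem.Set.ofList l) (fun p => toLex p)

-- one round of A's `for d in directions:` — advance, test, add to ut, or mark d[0] := -1
def pvAPass (board : List String) (R C : Int) :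
    List (Int × Int × Int × Int) → PySem.Set (Int × Int) →
    (List (Int × Int × Int × Int) × PySem.Set (Int × Int))
  | [], ut => ([], ut)
  | (r, c, dr, dc) :: rest, ut =>
    let r' := r + dr
    let c' := c + dc
    if 0 ≤ r' ∧ r' < R ∧ 0 ≤ c' ∧ c' < C ∧ pvCellA board r' c' ≠ '#' then
      let p := pvAPass board R C rest (PySem.Set.add ut (r', c'))
      ((r', c', dr, dc) :: p.1, p.2)
    else
      let p := pvAPass board R C rest ut
      (((-1 : Int), c', dr, dc) :: p.1, p.2)

-- A's `while directions:` — fuel-bounded for totality only (fuel R+C+2 exceeds the possible pass count)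
def pvALoop (board : List String) (R C : Int) :
    Nat → List (Int × Int × Int × Int) → PySem.Set (Int × Int) → PySem.Set (Int × Int)
  | 0, _, ut => ut
  | n + 1, dirs, ut =>
    if dirs.isEmpty then ut
    else
      let p := pvAPass board R C dirs ut
      pvALoop board R C n (p.1.filter (fun d => d.1 != -1)) p.2

def get_under_threat_for_cells (board : List String) : List (Int × Int × List (Int × Int)) :=
  let R : Int := PySem.List.len board
  let C : Int := PySem.Str.len (board.headD "")   -- len(board[0]); IndexError on [] is outside Pre_
  let free := (PySem.List.pyRange 0 R 1).flatMap (fun i =>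
    (PySem.List.pyRange 0 C 1).filterMap (fun j =>
      if pvCellA board i j ≠ '#' then some (i, j) else none))
  let d := free.foldl (fun (d : PySem.Dict (Int × Int) (List (Int × Int))) ij =>
    let i := ij.1
    let j := ij.2
    let dirs : List (Int × Int × Int × Int) :=
      [(i, j, 1, 0), (i, j, 1, 1), (i, j, 0, 1), (i, j, -1, 1),
       (i, j, -1, 0), (i, j, -1, -1), (i, j, 0, -1), (i, j, 1, -1)]
    let ut : PySem.Set (Int × Int) := PySem.Set.add PySem.Set.empty (i, j)
    PySem.Dict.insert d (i, j)
      (pvFrozen (pvALoop board R C ((R + C).toNat + 2) dirs ut))) PySem.Dict.empty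
  d.items.map (fun kv => (kv.1.1, kv.1.2, kv.2))

-- ===== PORT B =====
def pvDirsB : List (Int × Int) :=
  [(1, 0), (1, 1), (0, 1), (-1, 1), (-1, 0), (-1, -1), (0, -1), (1, -1)]

def pvCellB (board : List String) (r c : Int) : Char :=
  ((PySem.List.pyGetD board r "").toList).getD c.toNat ' '

def pvOkB (board : List String) (R C r c : Int) : Bool :=
  decide (0 ≤ r) && decide (r < R) && decide (0 ≤ c) && decide (c < C) &&
  decide (pvCellB board r c ≠ '#')

-- B's inner `while 0 <= r < R and 0 <= c < C and board[r][c] != '#':` — one ray, fuel for totality only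
def pvRayB (board : List String) (R C : Int) :
    Nat → Int → Int → Int → Int → List (Int × Int)
  | 0, _, _, _, _ => []
  | n + 1, r, c, dr, dc =>
    if pvOkB board R C r c then (r, c) :: pvRayB board R C n (r + dr) (c + dc) dr dc else []

def get_under_threat_for_cells_alt (board : List String) : List (Int × Int × List (Int × Int)) :=
  let R : Int := PySem.List.len board
  let C : Int := PySem.Str.len (board.headD "")
  let d := ((PySem.List.pyRange 0 R 1).flatMap (fun i =>
      (PySem.List.pyRange 0 C 1).filterMap (fun j =>
        if pvCellB board i j ≠ '#' then some (i, j) else none))).foldl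
    (fun (d : PySem.Dict (Int × Int) (List (Int × Int))) ij =>
      let i := ij.1
      let j := ij.2
      let ut : List (Int × Int) :=
        (i, j) :: pvDirsB.flatMap (fun s =>
          pvRayB board R C ((R + C).toNat + 2) (i + s.1) (j + s.2) s.1 s.2)
      PySem.Dict.insert d (i, j) (pvFrozen ut)) PySem.Dict.empty
  d.items.map (fun kv => (kv.1.1, kv.1.2, kv.2))

-- ===== PRECONDITION & SPEC =====
-- Pre_ excludes exactly the inputs on which A raises IndexError: the empty board (board[0]) and
-- boards with a row shorter than row 0 (board[i][j] for j < len(board[0])).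
def Pre_get_under_threat_for_cells (board : List String) : Prop :=
  board ≠ [] ∧ ∀ s ∈ board, (board.headD "").toList.length ≤ s.toList.length

instance (board : List String) : Decidable (Pre_get_under_threat_for_cells board) := by
  unfold Pre_get_under_threat_for_cells; infer_instance

def pvWitness_get_under_threat_for_cells : List String := ["..", ".#"]

def Spec_get_under_threat_for_cells (board : List String) (out : List (Int × Int × List (Int × Int))) : Prop := out = get_under_threat_for_cells_alt board
instance (board : List String) (out : List (Int × Int × List (Int × Int))) : Decidable (Spec_get_under_threat_for_cells board out) := by unfold Spec_get_under_threat_for_cells; infer_instance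

-- ===== CLAIM (what is proved, stated in full; the proofs are below) =====
def Claim_equal_get_under_threat_for_cells : Prop := ∀ (board : List String), Dom_get_under_threat_for_cells board → Pre_get_under_threat_for_cells board → Spec_get_under_threat_for_cells board (get_under_threat_for_cells board)

-- ===== LEMMAS AND PROOFS =====

def pvAdv (q : Int × Int × Int × Int) : Int × Int × Int × Int :=
  (q.1 + q.2.2.1, q.2.1 + q.2.2.2, q.2.2.1, q.2.2.2)

def pvPos (q : Int × Int × Int × Int) : Int × Int := (q.1, q.2.1)

lemma pvOkB_iff (board : List String) (R C r c : Int) :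
    pvOkB board R C r c = true ↔
      (0 ≤ r ∧ r < R ∧ 0 ≤ c ∧ c < C ∧ pvCellA board r c ≠ '#') := by
  simp [pvOkB, pvCellB, pvCellA, and_assoc]

-- the canonical frozenset form only depends on the members of the list
lemma pvFrozen_congr (l1 l2 : List (Int × Int)) (h : ∀ x, x ∈ l1 ↔ x ∈ l2) :
    pvFrozen l1 = pvFrozen l2 := by
  unfold pvFrozen
  have hperm : (PySem.List.sorted (PySem.Set.ofList l1) (fun p => toLex p)).Perm
      (PySem.Set.ofList l2) := by
    refine (PySem.List.sorted_perm _ _ _).trans ?_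
    exact (List.perm_ext_iff_of_nodup (PySem.Set.nodup_ofList _)
      (PySem.Set.nodup_ofList _)).mpr (fun a => by
        simp only [PySem.Set.mem_ofList]; exact h a)
  have hnd : (PySem.List.sorted (PySem.Set.ofList l1) (fun p => toLex p)).Nodup :=
    ((PySem.List.sorted_perm _ _ _).nodup_iff).mpr (PySem.Set.nodup_ofList _)
  have hle := PySem.List.sorted_pairwise (PySem.Set.ofList l1) (fun p => toLex p)
  have hlt : (PySem.List.sorted (PySem.Set.ofList l1) (fun p => toLex p)).Pairwise
      (fun a b => toLex a < toLex b) := by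
    refine (hle.and hnd).imp ?_
    rintro a b ⟨h1, h2⟩
    exact lt_of_le_of_ne h1 (fun he => h2 (toLex.injective he))
  exact (PySem.List.sorted_eq_of_perm_of_pairwise_lt _ _ _ hperm hlt).symm

-- A's pruning: the surviving direction records of one pass are exactly the advanced live ones
lemma pvAPass_fst (board : List String) (R C : Int) :
    ∀ (dirs : List (Int × Int × Int × Int)) (ut : PySem.Set (Int × Int)),
      (pvAPass board R C dirs ut).1.filter (fun d => d.1 != -1) =
        (dirs.map pvAdv).filter (fun q => pvOkB board R C q.1 q.2.1) := by
  intro dirs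
  induction dirs with
  | nil => intro ut; simp [pvAPass]
  | cons q rest ih =>
    intro ut
    obtain ⟨r, c, dr, dc⟩ := q
    have hok := pvOkB_iff board R C (r + dr) (c + dc)
    by_cases h : 0 ≤ r + dr ∧ r + dr < R ∧ 0 ≤ c + dc ∧ c + dc < C ∧
        pvCellA board (r + dr) (c + dc) ≠ '#'
    · have hne : ((r + dr : Int) != -1) = true := by
        simp only [bne_iff_ne, ne_eq]; omega
      simp [pvAPass, if_pos h, hne, ih, pvAdv, hok.mpr h]
    · have hok' : pvOkB board R C (r + dr) (c + dc) = false := by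
        rw [Bool.eq_false_iff]; intro hcon; exact h (hok.mp hcon)
      simp [pvAPass, if_neg h, ih, pvAdv, hok']

-- one pass of A collects exactly the positions of the advanced live directions
lemma pvAPass_mem (board : List String) (R C : Int) :
    ∀ (dirs : List (Int × Int × Int × Int)) (ut : PySem.Set (Int × Int)) (x : Int × Int),
      x ∈ (pvAPass board R C dirs ut).2 ↔
        x ∈ ut ∨ ∃ q ∈ dirs, pvOkB board R C (pvAdv q).1 (pvAdv q).2.1 = true ∧
          x = pvPos (pvAdv q) := by
  intro dirs
  induction dirs with
  | nil => intro ut x; simp [pvAPass]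
  | cons q rest ih =>
    intro ut x
    obtain ⟨r, c, dr, dc⟩ := q
    have hok := pvOkB_iff board R C (r + dr) (c + dc)
    by_cases h : 0 ≤ r + dr ∧ r + dr < R ∧ 0 ≤ c + dc ∧ c + dc < C ∧
        pvCellA board (r + dr) (c + dc) ≠ '#'
    · simp only [pvAPass, if_pos h, ih, PySem.Set.mem_add, List.mem_cons]
      constructor
      · rintro (( hx | rfl) | ⟨q', hq', hokq', rfl⟩)
        · exact Or.inl hx
        · exact Or.inr ⟨(r, c, dr, dc), Or.inl rfl, by simp [pvAdv, pvPos, hok.mpr h]⟩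
        · exact Or.inr ⟨q', Or.inr hq', hokq', rfl⟩
      · rintro (hx | ⟨q', (rfl | hq'), hokq', rfl⟩)
        · exact Or.inl (Or.inl hx)
        · exact Or.inl (Or.inr (by simp [pvAdv, pvPos]))
        · exact Or.inr ⟨q', hq', hokq', rfl⟩
    · have hok' : pvOkB board R C (r + dr) (c + dc) = false := by
        rw [Bool.eq_false_iff]; intro hcon; exact h (hok.mp hcon)
      simp only [pvAPass, if_neg h, ih]
      constructor
      · rintro (hx | ⟨q', hq', hokq', rfl⟩)
        · exact Or.inl hx
        · exact Or.inr ⟨q', List.mem_cons_of_mem _ hq', hokq', rfl⟩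
      · rintro (hx | ⟨q', hq', hokq', rfl⟩)
        · exact Or.inl hx
        rcases List.mem_cons.mp hq' with rfl | hq'
        · exact absurd hokq' (by simp [pvAdv, hok'])
        · exact Or.inr ⟨q', hq', hokq', rfl⟩

-- the lockstep loop collects, per surviving direction record, exactly the per-direction ray of B
lemma pvALoop_mem (board : List String) (R C : Int) :
    ∀ (n : Nat) (dirs : List (Int × Int × Int × Int)) (ut : PySem.Set (Int × Int)) (x : Int × Int),
      x ∈ pvALoop board R C n dirs ut ↔
        x ∈ ut ∨ ∃ q ∈ dirs,
          x ∈ pvRayB board R C n (pvAdv q).1 (pvAdv q).2.1 (pvAdv q).2.2.1 (pvAdv q).2.2.2 := by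
  intro n
  induction n with
  | zero => intro dirs ut x; simp [pvALoop, pvRayB]
  | succ n ih =>
    intro dirs ut x
    by_cases hdir : dirs = []
    · subst hdir; simp [pvALoop]
    · have hne : dirs.isEmpty = false := by simpa using hdir
      rw [pvALoop]
      simp only [hne, Bool.false_eq_true, if_false]
      rw [pvAPass_fst, ih]
      rw [pvAPass_mem]
      constructor
      · rintro ((hx | ⟨q, hq, hokq, rfl⟩) | ⟨q', hq', hray⟩)
        · exact Or.inl hx
        · refine Or.inr ⟨q, hq, ?_⟩
          rw [pvRayB]
          simp [hokq, pvPos]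
        · obtain ⟨hmap, hokq'⟩ := List.mem_filter.mp hq'
          obtain ⟨q, hq, rfl⟩ := List.mem_map.mp hmap
          refine Or.inr ⟨q, hq, ?_⟩
          rw [pvRayB]
          simp only [hokq', if_true, List.mem_cons]
          exact Or.inr (by simpa [pvAdv] using hray)
      · rintro (hx | ⟨q, hq, hray⟩)
        · exact Or.inl (Or.inl hx)
        · rw [pvRayB] at hray
          by_cases hokq : pvOkB board R C (pvAdv q).1 (pvAdv q).2.1 = true
          · simp only [hokq, if_true, List.mem_cons] at hray
            rcases hray with rfl | hray
            · exact Or.inl (Or.inr ⟨q, hq, hokq, rfl⟩)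
            · refine Or.inr ⟨pvAdv q, ?_, ?_⟩
              · exact List.mem_filter.mpr ⟨List.mem_map.mpr ⟨q, hq, rfl⟩, hokq⟩
              · simpa [pvAdv] using hray
          · simp only [Bool.not_eq_true] at hokq
            simp [hokq] at hray

-- per free cell, A's lockstep set equals B's union of rays (same members, hence same frozen form)
lemma pvCell_eq (board : List String) (R C i j : Int) :
    pvFrozen (pvALoop board R C ((R + C).toNat + 2)
      [(i, j, 1, 0), (i, j, 1, 1), (i, j, 0, 1), (i, j, -1, 1),
       (i, j, -1, 0), (i, j, -1, -1), (i, j, 0, -1), (i, j, 1, -1)]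
      (PySem.Set.add PySem.Set.empty (i, j))) =
    pvFrozen ((i, j) :: pvDirsB.flatMap (fun s =>
      pvRayB board R C ((R + C).toNat + 2) (i + s.1) (j + s.2) s.1 s.2)) := by
  refine pvFrozen_congr _ _ (fun x => ?_)
  rw [pvALoop_mem]
  simp only [List.mem_cons, List.mem_flatMap, List.not_mem_nil, or_false,
    PySem.Set.mem_add, pvDirsB]
  constructor
  · rintro ((h | rfl) | ⟨q, hq, hray⟩)
    · exact absurd h (by simp [PySem.Set.empty])
    · exact Or.inl rfl
    · rcases hq with rfl | rfl | rfl | rfl | rfl | rfl | rfl | rfl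
      · exact Or.inr ⟨(1, 0), Or.inl rfl, by simpa [pvAdv] using hray⟩
      · exact Or.inr ⟨(1, 1), by simp, by simpa [pvAdv] using hray⟩
      · exact Or.inr ⟨(0, 1), by simp, by simpa [pvAdv] using hray⟩
      · exact Or.inr ⟨(-1, 1), by simp, by simpa [pvAdv] using hray⟩
      · exact Or.inr ⟨(-1, 0), by simp, by simpa [pvAdv] using hray⟩
      · exact Or.inr ⟨(-1, -1), by simp, by simpa [pvAdv] using hray⟩
      · exact Or.inr ⟨(0, -1), by simp, by simpa [pvAdv] using hray⟩
      · exact Or.inr ⟨(1, -1), by simp, by simpa [pvAdv] using hray⟩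
  · rintro (rfl | ⟨s, hs, hray⟩)
    · exact Or.inl (Or.inr rfl)
    · rcases hs with rfl | rfl | rfl | rfl | rfl | rfl | rfl | rfl
      · exact Or.inr ⟨(i, j, 1, 0), by simp, by simpa [pvAdv] using hray⟩
      · exact Or.inr ⟨(i, j, 1, 1), by simp, by simpa [pvAdv] using hray⟩
      · exact Or.inr ⟨(i, j, 0, 1), by simp, by simpa [pvAdv] using hray⟩
      · exact Or.inr ⟨(i, j, -1, 1), by simp, by simpa [pvAdv] using hray⟩
      · exact Or.inr ⟨(i, j, -1, 0), by simp, by simpa [pvAdv] using hray⟩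
      · exact Or.inr ⟨(i, j, -1, -1), by simp, by simpa [pvAdv] using hray⟩
      · exact Or.inr ⟨(i, j, 0, -1), by simp, by simpa [pvAdv] using hray⟩
      · exact Or.inr ⟨(i, j, 1, -1), by simp, by simpa [pvAdv] using hray⟩

-- ===== VERDICT (by name: the statement is the Claim_ definition above) =====
theorem get_under_threat_for_cells_spec : Claim_equal_get_under_threat_for_cells := by
  intro board _ _
  unfold Spec_get_under_threat_for_cells
  unfold get_under_threat_for_cells get_under_threat_for_cells_alt
  have hcell : pvCellB = pvCellA := rfl
  rw [hcell]
  simp only [pvCell_eq]
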